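-- pv_equiv track=rewrite | github.com/rock-hu/minor-projects | openharmony/arkcompiler_runtime_core/static_core/tests/vm-benchmarks/src/vmb/plugins/hooks/cpumask.py | parse_bitmask
-- ===== SOURCE A (Python) =====
-- from typing import Dict, List, Tuple, Optional
--
-- def parse_bitmask(mask_s: Optional[str]) -> Tuple[str, List[bool]]:
--     if not mask_s:
--         return '', []
--     if mask_s.startswith('0b'):
--         n_cores = len(mask_s[len('0b'):])
--         mask_i = int(mask_s, base=2)
--         padding = (n_cores - 1) // 4 + 1
--         leftpadded_hex_mask = f'{mask_i:#0{padding+2}x}'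
--         taskset_arg, leftpadded_mask = parse_bitmask(leftpadded_hex_mask)
--         return taskset_arg, leftpadded_mask[:n_cores]
--     mask_s = mask_s[2:] if mask_s.startswith('0x') else mask_s
--     mask_i = int(f'0x{mask_s}', base=16)
--     return mask_s, [0 != mask_i & (1 << i) for i in range(len(mask_s) * 4)]
-- ===== SOURCE B (Python) =====
-- from typing import Dict, List, Tuple, Optional
--
--
-- def _bit_list(v: int, n: int) -> List[bool]:
--     # the n binary digits of v (v < 2**n), zero-padded, least significant first
--     return [c == '1' for c in reversed(format(v, '0%db' % n))]
--
--
-- def parse_bitmask(mask_s: Optional[str]) -> Tuple[str, List[bool]]: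
--     if not mask_s:
--         return '', []
--     if mask_s.startswith('0b'):
--         bits = mask_s[2:]
--         mask_i = int(mask_s, base=2)
--         ndigits = (len(bits) - 1) // 4 + 1
--         return format(mask_i, '0%dx' % ndigits), _bit_list(mask_i, len(bits))
--     t = mask_s[2:] if mask_s.startswith('0x') else mask_s
--     mask_i = int('0x' + t, base=16)
--     return t, _bit_list(mask_i, len(t) * 4)
-- ===== Notes on version B (the rewrite author's own statement) =====
-- stated objective: faster
-- what changed: Inlined the '0b' recursion into one flat function (no recursive re-parse, no slice truncation) and replaced A's per-index big-int bit tests over range(len*4) (each '&' scans the whole big int, so quadratic) with one zero-padded binary string format of the parsed integer read back LSB-first; Pre_ excludes exactly the inputs on which A's int() raises ValueError (B raises there too).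
-- outside the precondition, e.g. on parse_bitmask('0b'): A raises ValueError, B raises ValueError
import Mathlib
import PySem

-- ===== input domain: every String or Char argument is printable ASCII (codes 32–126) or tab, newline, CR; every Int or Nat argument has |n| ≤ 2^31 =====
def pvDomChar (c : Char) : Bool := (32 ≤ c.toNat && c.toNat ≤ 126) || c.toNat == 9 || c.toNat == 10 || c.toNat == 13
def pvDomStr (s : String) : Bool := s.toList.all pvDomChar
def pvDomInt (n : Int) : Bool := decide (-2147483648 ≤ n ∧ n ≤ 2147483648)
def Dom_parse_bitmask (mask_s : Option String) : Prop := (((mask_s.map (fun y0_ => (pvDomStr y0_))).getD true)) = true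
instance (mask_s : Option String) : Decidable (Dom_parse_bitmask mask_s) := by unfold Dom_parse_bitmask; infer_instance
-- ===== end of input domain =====

-- B inlines A's '0b' recursion (no recursive call, no slice truncation) and builds the bool
-- list from one zero-padded binary string of the parsed integer instead of n independent
-- big-int bit tests over range(len*4); A = B proved on Pre_ (= exactly where int() returns).

-- ===== shared model of Python's int(prefix + cs, base) for a string already carrying its
-- base prefix (so no sign/leading whitespace is possible): trailing whitespace is stripped,
-- then the numeral must be digits with single underscores between digits (an underscore is
-- also allowed directly after the prefix, i.e. at the start), and the value ignores the
-- underscores.  Exact on Dom (whitespace there is ' ', tab, LF, CR). =====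

-- int(c, 16) for a single hex digit; none = ValueError
def hexVal? (c : Char) : Option Nat :=
  if 48 ≤ c.toNat ∧ c.toNat ≤ 57 then some (c.toNat - 48)        -- '0'..'9'
  else if 97 ≤ c.toNat ∧ c.toNat ≤ 102 then some (c.toNat - 87)  -- 'a'..'f'
  else if 65 ≤ c.toNat ∧ c.toNat ≤ 70 then some (c.toNat - 55)   -- 'A'..'F'
  else none

def binVal? (c : Char) : Option Nat :=
  if c = '0' then some 0 else if c = '1' then some 1 else none

def isSpaceC (c : Char) : Bool := c == ' ' || c == '\t' || c == '\n' || c == '\r'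

-- the string with trailing whitespace removed (int() ignores it)
def rstripSp (cs : List Char) : List Char := (cs.reverse.dropWhile isSpaceC).reverse

-- underscore-grouping + digit validity; prevU = 'previous char was an underscore'
def gTail (dv : Char → Option Nat) (cs : List Char) (prevU : Bool) : Bool :=
  match cs with
  | [] => !prevU
  | c :: r => if c = '_' then !prevU && gTail dv r true else (dv c).isSome && gTail dv r false

-- whether int(prefix + cs, base) returns (no ValueError)
def numOk (dv : Char → Option Nat) (cs : List Char) : Bool :=
  !(rstripSp cs).isEmpty && gTail dv (rstripSp cs) false

-- the value int() returns when numOk holds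
def numVal (dv : Char → Option Nat) (base : Nat) (cs : List Char) : Nat :=
  ((rstripSp cs).filter (fun c => c != '_')).foldl (fun a c => a * base + (dv c).getD 0) 0

-- int(prefix + cs, base); none = ValueError
def pyIntAfterPrefix (dv : Char → Option Nat) (base : Nat) (cs : List Char) : Option Nat :=
  if numOk dv cs then some (numVal dv base cs) else none

-- ===== PORT A =====

def toHexDigit (d : Nat) : Char := if d < 10 then Char.ofNat (48 + d) else Char.ofNat (87 + d)

-- lowercase hex digits of n (no prefix), as '%x' produces
def toHex (n : Nat) : List Char :=
  if n < 16 then [toHexDigit n] else toHex (n / 16) ++ [toHexDigit (n % 16)]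
  decreasing_by exact Nat.div_lt_self (by omega) (by omega)

-- zero-pad the hex digits of n to width w, i.e. format(n, '0{w}x')
def padHex (w : Nat) (n : Nat) : List Char :=
  List.replicate (w - (toHex n).length) '0' ++ toHex n

theorem startswith_0x_not_0b (l : List Char) :
    PySem.Chars.startswith ('0' :: 'x' :: l) ("0b".toList) = false := by
  rw [Bool.eq_false_iff]
  intro h
  have := (PySem.Chars.startswith_iff _ _).mp h
  simp [List.cons_prefix_cons] at this

def parse_bitmask (mask_s : Option String) : String × List Bool :=
  match mask_s with
  | none => ("", [])
  | some s =>
    if s.toList = [] then ("", [])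
    else if PySem.Str.startswith s "0b" then
      let bits := s.toList.drop 2
      let n_cores := bits.length
      match pyIntAfterPrefix binVal? 2 bits with
      | none => ("", [])             -- int(mask_s, 2) raises ValueError: outside Pre_
      | some mask_i =>
        let padding := (n_cores - 1) / 4 + 1
        -- f'{mask_i:#0{padding+2}x}' = '0x' + zero-padded lowercase hex
        let leftpadded_hex_mask := String.ofList ('0' :: 'x' :: padHex padding mask_i)
        let r := parse_bitmask (some leftpadded_hex_mask)
        (r.1, r.2.take n_cores)
    else
      let t := if PySem.Str.startswith s "0x" then s.toList.drop 2 else s.toList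
      match pyIntAfterPrefix hexVal? 16 t with
      | none => ("", [])             -- int('0x'+t, 16) raises ValueError: outside Pre_
      | some mask_i =>
        (String.ofList t, (List.range (t.length * 4)).map (fun i => mask_i.testBit i))
  termination_by match mask_s with
    | none => 0
    | some s => if PySem.Str.startswith s "0b" then 1 else 0
  decreasing_by
    simp only [PySem.Str.startswith_eq, String.toList_ofList, startswith_0x_not_0b] at *
    simp_all

-- ===== PORT B =====

-- binary digits of n (no prefix), as '%b' produces
def toBin (n : Nat) : List Char :=
  if n < 2 then [Char.ofNat (48 + n)] else toBin (n / 2) ++ [Char.ofNat (48 + n % 2)]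
  decreasing_by exact Nat.div_lt_self (by omega) (by omega)

-- zero-pad the binary digits of n to width w, i.e. format(n, '0{w}b')
def padBin (w n : Nat) : List Char :=
  List.replicate (w - (toBin n).length) '0' ++ toBin n

-- _bit_list: [c == '1' for c in reversed(format(v, '0{n}b'))]
def bitList (v n : Nat) : List Bool := (padBin n v).reverse.map (fun c => c == '1')

def parse_bitmask_alt (mask_s : Option String) : String × List Bool :=
  match mask_s with
  | none => ("", [])
  | some s =>
    if s.toList = [] then ("", [])
    else if PySem.Str.startswith s "0b" then
      let bits := s.toList.drop 2
      match pyIntAfterPrefix binVal? 2 bits with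
      | none => ("", [])
      | some mask_i =>
        let ndigits := (bits.length - 1) / 4 + 1
        (String.ofList (padHex ndigits mask_i), bitList mask_i bits.length)
    else
      let t := if PySem.Str.startswith s "0x" then s.toList.drop 2 else s.toList
      match pyIntAfterPrefix hexVal? 16 t with
      | none => ("", [])
      | some mask_i => (String.ofList t, bitList mask_i (t.length * 4))

-- ===== PRECONDITION & SPEC =====

-- Pre_ excludes exactly the inputs on which Python's int() — called by both A and B —
-- raises ValueError (empty or malformed numeral); on every other input A returns normally.
def Pre_parse_bitmask (mask_s : Option String) : Prop :=
  match mask_s with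
  | none => True
  | some s =>
    s.toList = [] ∨
    (if PySem.Str.startswith s "0b" then numOk binVal? (s.toList.drop 2) = true
     else numOk hexVal?
       (if PySem.Str.startswith s "0x" then s.toList.drop 2 else s.toList) = true)

instance (mask_s : Option String) : Decidable (Pre_parse_bitmask mask_s) := by
  unfold Pre_parse_bitmask; cases mask_s <;> infer_instance

def pvWitness_parse_bitmask : Option String := some "0b10110"

def Spec_parse_bitmask (mask_s : Option String) (out : String × List Bool) : Prop := out = parse_bitmask_alt mask_s
instance (mask_s : Option String) (out : String × List Bool) : Decidable (Spec_parse_bitmask mask_s out) := by unfold Spec_parse_bitmask; infer_instance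

-- ===== CLAIM (what is proved, stated in full; the proofs are below) =====
def Claim_equal_parse_bitmask : Prop := ∀ (mask_s : Option String), Dom_parse_bitmask mask_s → Pre_parse_bitmask mask_s → Spec_parse_bitmask mask_s (parse_bitmask mask_s)

-- ===== LEMMAS AND PROOFS =====

-- the value of a hex digit string, as the foldl the int() model computes
def hexValue (cs : List Char) : Nat := cs.foldl (fun a c => a * 16 + (hexVal? c).getD 0) 0

theorem hexVal?_getD_lt (c : Char) : (hexVal? c).getD 0 < 16 := by
  unfold hexVal?; split_ifs <;> simp [Option.getD] <;> omega

theorem binVal?_getD_lt (c : Char) : (binVal? c).getD 0 < 2 := by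
  unfold binVal?; split_ifs <;> simp

-- generic digit-foldl bound: a string of k digits below the base has value below base^k
theorem foldl_digits_lt (dv : Char → Option Nat) (base : Nat) (hb : 1 ≤ base)
    (hd : ∀ c, (dv c).getD 0 < base) :
    ∀ (cs : List Char) (a : Nat),
      cs.foldl (fun a c => a * base + (dv c).getD 0) a < (a + 1) * base ^ cs.length := by
  intro cs
  induction cs with
  | nil => intro a; simpa using Nat.lt_succ_self a
  | cons c cs ih =>
    intro a
    calc (c :: cs).foldl (fun a c => a * base + (dv c).getD 0) a
        = cs.foldl (fun a c => a * base + (dv c).getD 0) (a * base + (dv c).getD 0) := rfl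
      _ < (a * base + (dv c).getD 0 + 1) * base ^ cs.length := ih _
      _ ≤ ((a + 1) * base) * base ^ cs.length := by
          have h1 := hd c
          have h2 : (a + 1) * base = a * base + base := by ring
          apply Nat.mul_le_mul_right
          omega
      _ = (a + 1) * base ^ (c :: cs).length := by
          rw [List.length_cons, pow_succ]
          ring

-- numVal is below base ^ (length of the raw string)
theorem numVal_lt (dv : Char → Option Nat) (base : Nat) (hb : 1 ≤ base)
    (hd : ∀ c, (dv c).getD 0 < base) (cs : List Char) :
    numVal dv base cs < base ^ cs.length := by
  have h := foldl_digits_lt dv base hb hd ((rstripSp cs).filter (fun c => c != '_')) 0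
  simp only [Nat.zero_add, Nat.one_mul] at h
  have hlen : ((rstripSp cs).filter (fun c => c != '_')).length ≤ cs.length := by
    calc ((rstripSp cs).filter (fun c => c != '_')).length
        ≤ (rstripSp cs).length := List.length_filter_le _ _
      _ ≤ cs.length := by
          unfold rstripSp
          rw [List.length_reverse]
          calc (cs.reverse.dropWhile isSpaceC).length
              ≤ cs.reverse.length := List.length_dropWhile_le _ _
            _ = cs.length := List.length_reverse
  exact lt_of_lt_of_le h (Nat.pow_le_pow_right hb hlen)

theorem toBin_reverse_map (v : Nat) :
    (toBin v).reverse.map (fun c => c == '1') =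
      (List.range (toBin v).length).map (fun i => v.testBit i) := by
  induction v using Nat.strong_induction_on with
  | _ v ih =>
    rw [toBin]
    split
    · interval_cases v <;> decide
    · rename_i h
      rw [List.reverse_append, List.reverse_singleton, List.singleton_append, List.map_cons,
        ih (v / 2) (Nat.div_lt_self (by omega) (by omega)),
        List.length_append, List.length_singleton, List.range_succ_eq_map, List.map_cons,
        List.map_map]
      congr 1
      · have h2 : v % 2 = 0 ∨ v % 2 = 1 := by omega
        rcases h2 with h2 | h2 <;> rw [Nat.testBit_zero, h2] <;> decide
      · apply List.map_congr_left
        intro i _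
        simp only [Function.comp_apply, Nat.testBit_succ]

theorem lt_two_pow_toBin_length (v : Nat) : v < 2 ^ (toBin v).length := by
  induction v using Nat.strong_induction_on with
  | _ v ih =>
    rw [toBin]
    split
    · simpa using by omega
    · rename_i h
      have := ih (v / 2) (Nat.div_lt_self (by omega) (by omega))
      rw [List.length_append, List.length_singleton, pow_succ]
      omega

theorem toBin_length_le (v n : Nat) (hn : 1 ≤ n) (hv : v < 2 ^ n) :
    (toBin v).length ≤ n := by
  induction v using Nat.strong_induction_on generalizing n with
  | _ v ih =>
    rw [toBin]
    split
    · simpa using hn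
    · rename_i h
      have hn2 : 2 ≤ n := by
        by_contra hc
        interval_cases n <;> omega
      have hv2 : v / 2 < 2 ^ (n - 1) := by
        have : 2 ^ n = 2 * 2 ^ (n - 1) := by
          rw [← pow_succ']
          congr 1
          omega
        omega
      have := ih (v / 2) (Nat.div_lt_self (by omega) (by omega)) (n - 1) (by omega) hv2
      rw [List.length_append, List.length_singleton]
      omega

-- B's padded binary string, reversed and compared to '1', is A's independent bit tests
theorem bitList_eq (v n : Nat) (hn : 1 ≤ n) (hv : v < 2 ^ n) :
    bitList v n = (List.range n).map (fun i => v.testBit i) := by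
  have hL : (toBin v).length ≤ n := toBin_length_le v n hn hv
  unfold bitList padBin
  rw [List.reverse_append, List.reverse_replicate, List.map_append, toBin_reverse_map]
  rw [show n = (toBin v).length + (n - (toBin v).length) from by omega, List.range_add,
    List.map_append]
  congr 1
  rw [show (toBin v).length + (n - (toBin v).length) - (toBin v).length
      = n - (toBin v).length from by omega, List.map_map, List.map_replicate,
    show ('0' == '1') = false from by decide]
  symm
  have hall : ∀ x ∈ (List.range (n - (toBin v).length)).map
      ((fun i => v.testBit i) ∘ (fun x => (toBin v).length + x)), x = false := by
    intro x hx
    obtain ⟨i, _, hi⟩ := List.mem_map.mp hx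
    rw [← hi]
    exact Nat.testBit_eq_false_of_lt
      (lt_of_lt_of_le (lt_two_pow_toBin_length v)
        (Nat.pow_le_pow_right (by omega) (by simp)))
  simpa using List.eq_replicate_of_mem hall

theorem hexVal?_toHexDigit (d : Nat) (hd : d < 16) : hexVal? (toHexDigit d) = some d := by
  interval_cases d <;> decide

theorem toHex_ne_nil (n : Nat) : toHex n ≠ [] := by
  rw [toHex]; split <;> simp

theorem toHex_valid (n : Nat) : ∀ c ∈ toHex n, (hexVal? c).isSome = true := by
  induction n using Nat.strong_induction_on with
  | _ n ih =>
    rw [toHex]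
    split
    · intro c hc
      simp only [List.mem_singleton] at hc
      simp [hc, hexVal?_toHexDigit n (by omega)]
    · intro c hc
      rcases List.mem_append.mp hc with h | h
      · exact ih (n / 16) (Nat.div_lt_self (by omega) (by omega)) c h
      · simp only [List.mem_singleton] at h
        simp [h, hexVal?_toHexDigit (n % 16) (Nat.mod_lt _ (by omega))]

theorem hexValue_append_singleton (cs : List Char) (c : Char) :
    hexValue (cs ++ [c]) = hexValue cs * 16 + (hexVal? c).getD 0 := by
  simp [hexValue]

theorem hexValue_toHex (n : Nat) : hexValue (toHex n) = n := by
  induction n using Nat.strong_induction_on with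
  | _ n ih =>
    rw [toHex]
    split
    · rename_i h
      simp [hexValue, hexVal?_toHexDigit n h]
    · rename_i h
      rw [hexValue_append_singleton, ih (n / 16) (Nat.div_lt_self (by omega) (by omega)),
        hexVal?_toHexDigit (n % 16) (Nat.mod_lt _ (by omega))]
      simp only [Option.getD_some]
      omega

theorem foldl_replicate_zero (k : Nat) :
    List.foldl (fun a c => a * 16 + (hexVal? c).getD 0) 0 (List.replicate k '0') = 0 := by
  induction k with
  | zero => rfl
  | succ k ih => simpa [List.replicate_succ, show (hexVal? '0').getD 0 = 0 from rfl] using ih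

theorem hexValue_padHex (w n : Nat) : hexValue (padHex w n) = n := by
  unfold padHex
  rw [hexValue, List.foldl_append, foldl_replicate_zero, ← hexValue, hexValue_toHex]

theorem padHex_ne_nil (w n : Nat) : padHex w n ≠ [] := by
  simp [padHex, toHex_ne_nil]

theorem padHex_length_ge (w n : Nat) : w ≤ (padHex w n).length := by
  simp only [padHex, List.length_append, List.length_replicate]
  omega

theorem padHex_valid (w n : Nat) : ∀ c ∈ padHex w n, (hexVal? c).isSome = true := by
  intro c hc
  rcases List.mem_append.mp hc with h | h
  · simp only [List.mem_replicate] at h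
    rw [h.2]; decide
  · exact toHex_valid n c h

-- a hex digit is neither an underscore nor whitespace
theorem hexDigit_shape (c : Char) (h : (hexVal? c).isSome = true) :
    (c != '_') = true ∧ isSpaceC c = false := by
  have hr : (48 ≤ c.toNat ∧ c.toNat ≤ 57) ∨ (97 ≤ c.toNat ∧ c.toNat ≤ 102) ∨
      (65 ≤ c.toNat ∧ c.toNat ≤ 70) := by
    unfold hexVal? at h
    split_ifs at h with h1 h2 h3
    · exact Or.inl h1
    · exact Or.inr (Or.inl h2)
    · exact Or.inr (Or.inr h3)
    · simp at h
  constructor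
  · rw [bne_iff_ne]
    intro hc
    rw [hc] at hr
    revert hr
    decide
  · rw [Bool.eq_false_iff]
    intro hs
    unfold isSpaceC at hs
    simp only [Bool.or_eq_true, beq_iff_eq] at hs
    rcases hs with ((h1 | h1) | h1) | h1 <;> (rw [h1] at hr; revert hr; decide)

-- gTail holds (from the after-digit state) on any pure digit string
theorem gTail_all_digits (dv : Char → Option Nat) (cs : List Char)
    (h : ∀ c ∈ cs, (dv c).isSome = true ∧ (c != '_') = true) : gTail dv cs false = true := by
  induction cs with
  | nil => rfl
  | cons c r ih =>
    have hc := h c (by simp)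
    rw [gTail]
    have hne : ¬ (c = '_') := by simpa using hc.2
    rw [if_neg hne, hc.1, Bool.true_and]
    exact ih (fun c hc' => h c (by simp [hc']))

-- int('0x' + a pure nonempty hex digit string) parses it verbatim
theorem pyIntAfterPrefix_hex_digits (cs : List Char) (hne : cs ≠ [])
    (hv : ∀ c ∈ cs, (hexVal? c).isSome = true) :
    pyIntAfterPrefix hexVal? 16 cs = some (hexValue cs) := by
  have hshape : ∀ c ∈ cs, (c != '_') = true ∧ isSpaceC c = false :=
    fun c hc => hexDigit_shape c (hv c hc)
  have hstrip : rstripSp cs = cs := by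
    unfold rstripSp
    rw [List.dropWhile_eq_self_iff.mpr, List.reverse_reverse]
    intro h
    have hl : cs.length - 1 < cs.length := by
      rw [List.length_reverse] at h; omega
    simp [(hshape _ (List.getElem_mem hl)).2]
  have hfilter : cs.filter (fun c => c != '_') = cs :=
    List.filter_eq_self.mpr (fun c hc => (hshape c hc).1)
  unfold pyIntAfterPrefix numOk numVal
  rw [hstrip, hfilter, gTail_all_digits hexVal? cs (fun c hc => ⟨hv c hc, (hshape c hc).1⟩)]
  simp [hexValue, hne]

-- A on '0x' + a nonempty pure hex digit string: the hex branch, evaluated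
theorem parse_bitmask_hex_eval (hx : List Char) (hne : hx ≠ [])
    (hv : ∀ c ∈ hx, (hexVal? c).isSome = true) :
    parse_bitmask (some (String.ofList ('0' :: 'x' :: hx))) =
      (String.ofList hx, (List.range (hx.length * 4)).map (fun i => (hexValue hx).testBit i)) := by
  have hsw : PySem.Chars.startswith ('0' :: 'x' :: hx) ("0x".toList) = true := by
    rw [PySem.Chars.startswith_iff]
    simp [List.cons_prefix_cons]
  rw [parse_bitmask]
  simp only [String.toList_ofList, PySem.Str.startswith_eq, startswith_0x_not_0b, hsw,
    reduceCtorEq, if_true, if_false, Bool.false_eq_true,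
    List.drop_succ_cons, List.drop_zero, pyIntAfterPrefix_hex_digits hx hne hv]

-- truncating A's range(4*L) bit map to n ≤ 4*L gives B's range(n) bit map
theorem map_range_take (v L n : Nat) (h : n ≤ L) :
    ((List.range L).map (fun i => v.testBit i)).take n =
      (List.range n).map (fun i => v.testBit i) := by
  rw [← List.map_take, List.take_range, Nat.min_eq_left h]

-- numOk true means the raw string (hence the stripped one) is nonempty
theorem numOk_ne_nil (dv : Char → Option Nat) (cs : List Char) (h : numOk dv cs = true) :
    cs ≠ [] := by
  intro hcs
  rw [hcs] at h
  simp [numOk, rstripSp] at h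

-- ===== VERDICT (by name: the statement is the Claim_ definition above) =====
theorem parse_bitmask_spec : Claim_equal_parse_bitmask := by
  unfold Claim_equal_parse_bitmask
  intro ms _dom pre
  unfold Spec_parse_bitmask
  cases ms with
  | none => rw [parse_bitmask, parse_bitmask_alt]
  | some s =>
    rw [parse_bitmask, parse_bitmask_alt]
    by_cases he : s.toList = []
    · simp [he]
    · rw [if_neg he, if_neg he]
      simp only [Pre_parse_bitmask] at pre
      by_cases hb : PySem.Str.startswith s "0b" = true
      · -- binary branch
        simp only [hb, if_true]
        rw [if_pos hb] at pre
        rcases pre with h | hok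
        · exact absurd h he
        · set bits := s.toList.drop 2 with hbits
          have hpy : pyIntAfterPrefix binVal? 2 bits = some (numVal binVal? 2 bits) := by
            unfold pyIntAfterPrefix; rw [if_pos hok]
          simp only [hpy]
          set n := bits.length with hn
          set v := numVal binVal? 2 bits with hvdef
          set p := (n - 1) / 4 + 1 with hp
          have hn1 : 1 ≤ n :=
            Nat.one_le_iff_ne_zero.mpr
              (fun h => numOk_ne_nil binVal? bits hok (List.eq_nil_of_length_eq_zero h))
          have hvlt : v < 2 ^ n := numVal_lt binVal? 2 (by omega) binVal?_getD_lt bits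
          simp only [parse_bitmask_hex_eval (padHex p v) (padHex_ne_nil p v) (padHex_valid p v)]
          rw [hexValue_padHex, bitList_eq v n hn1 hvlt, map_range_take]
          have := padHex_length_ge p v
          omega
      · -- hex branch
        rw [Bool.not_eq_true] at hb
        have hbc : PySem.Chars.startswith s.toList ['0', 'b'] = false := by
          have h2 := hb
          rw [PySem.Str.startswith_eq] at h2
          simpa using h2
        simp only [hb, Bool.false_eq_true, if_false]
        rw [if_neg (by simp [hbc])] at pre
        rcases pre with h | hok
        · exact absurd h he
        · set t := if PySem.Str.startswith s "0x" = true then s.toList.drop 2 else s.toList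
            with ht
          have hpy : pyIntAfterPrefix hexVal? 16 t = some (numVal hexVal? 16 t) := by
            unfold pyIntAfterPrefix; rw [if_pos hok]
          simp only [hpy]
          have ht1 : 1 ≤ t.length :=
            Nat.one_le_iff_ne_zero.mpr
              (fun h => numOk_ne_nil hexVal? t hok (List.eq_nil_of_length_eq_zero h))
          have hvlt : numVal hexVal? 16 t < 2 ^ (t.length * 4) := by
            calc numVal hexVal? 16 t < 16 ^ t.length :=
                  numVal_lt hexVal? 16 (by omega) hexVal?_getD_lt t
              _ = 2 ^ (t.length * 4) := by rw [Nat.mul_comm, Nat.pow_mul]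
          rw [bitList_eq _ _ (by omega : 1 ≤ t.length * 4) hvlt]
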